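-- pv_equiv track=rewrite | github.com/rueckstiess/cannonball | cannonball/document.py | _change_indent
-- ===== SOURCE A (Python) =====
-- from typing import Union, Optional
--
-- def _change_indent(markdown: str, indent: Union[str, int] = "\t") -> str:
--     """Change the indentation in rendered markdown.
--
--     Args:
--         markdown: The markdown string to modify
--         indent: The new indentation to use. If an integer, used as the number of spaces.
--             If a string, used directly as the indentation.
--
--     Returns:
--         The markdown with modified indentation
--     """
--     # Convert integer indent to spaces
--     if isinstance(indent, int):
--         indent_str = " " * indent
--     else:
--         indent_str = indent
--
--     # If using 2 spaces as indent, this is already the Marko default - no change needed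
--     if indent_str == "  ":
--         return markdown
--
--     lines = markdown.split("\n")
--     result = []
--
--     for line in lines:
--         # Count leading spaces
--         leading_spaces = len(line) - len(line.lstrip(" "))
--         # Calculate indent level (integer division by 2)
--         indent_level = leading_spaces // 2
--         # Replace leading spaces with the new indent
--         result.append(indent_str * indent_level + line[leading_spaces:])
--
--     return "\n".join(result)
-- ===== SOURCE B (Python) =====
-- from typing import Union
--
-- def _change_indent(markdown: str, indent: Union[str, int] = "\t") -> str:
--     """Single-pass rewrite of leading indentation: scan the string once with an
--     index cursor, rewriting each line's leading-space run in place, instead of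
--     splitting into a line list, slicing each line and joining again."""
--     if isinstance(indent, int):
--         indent = " " * indent
--     if indent == "  ":
--         return markdown
--     out = []
--     i, n = 0, len(markdown)
--     while i < n:
--         j = i
--         while j < n and markdown[j] == " ":
--             j += 1
--         out.append(indent * ((j - i) // 2))
--         k = markdown.find("\n", j)
--         if k == -1:
--             out.append(markdown[j:])
--             break
--         out.append(markdown[j:k + 1])
--         i = k + 1
--     return "".join(out)
-- ===== Notes on version B (the rewrite author's own statement) =====
-- stated objective: alternative
-- what changed: Replaces A's split-into-lines / per-line lstrip-count-and-slice / join pipeline by a single cursor pass over the string that rewrites each leading-space run in place and copies each line body (with its newline) directly, building no intermediate line list.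
import Mathlib
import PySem

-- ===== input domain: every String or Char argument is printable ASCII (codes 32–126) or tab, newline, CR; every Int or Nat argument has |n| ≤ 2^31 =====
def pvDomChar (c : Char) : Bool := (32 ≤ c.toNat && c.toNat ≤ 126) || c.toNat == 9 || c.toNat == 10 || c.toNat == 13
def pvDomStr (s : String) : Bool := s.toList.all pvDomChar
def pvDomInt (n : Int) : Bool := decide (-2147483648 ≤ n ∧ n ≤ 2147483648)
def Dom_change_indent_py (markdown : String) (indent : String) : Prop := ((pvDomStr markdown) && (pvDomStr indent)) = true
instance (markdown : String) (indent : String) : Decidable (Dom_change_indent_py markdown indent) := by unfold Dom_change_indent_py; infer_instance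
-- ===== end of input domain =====

-- B replaces A's split-into-lines / per-line-slice / join pipeline by one cursor pass over the
-- character stream that rewrites each leading-space run in place (alternative, same cost).

-- ===== PORT A =====
def change_indent_py (markdown : String) (indent : String) : String :=
  -- indent is a string here, so `isinstance(indent, int)` is False and indent_str = indent
  let indentStr := indent.toList
  if indentStr = [' ', ' '] then markdown
  else
    let lines := PySem.Chars.splitOn markdown.toList ['\n']
    let result := lines.foldl (fun acc line =>
      -- leading_spaces = len(line) - len(line.lstrip(" ")): lstrip(" ") drops leading spaces, exact
      let leadingSpaces : Nat := line.length - (line.dropWhile (fun c => c == ' ')).length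
      -- leading_spaces // 2 on a nonnegative count = Nat division, exact
      let indentLevel : Nat := leadingSpaces / 2
      -- line[leading_spaces:] with a nonnegative in-range index = List.drop, exact
      acc ++ [PySem.List.pyRepeat indentStr (indentLevel : Int) ++ line.drop leadingSpaces]) []
    String.ofList (PySem.Chars.join ['\n'] result)

-- ===== PORT B =====
-- Source B's cursor loop: the inner `while markdown[j] == " "` scan is takeWhile/dropWhile of spaces,
-- `markdown.find("\n", j)` with the two slices is takeWhile/dropWhile of non-newlines (exact:
-- find returns -1 iff no '\n' remains, which is the dropWhile-result-empty case)
def altGo (ind : List Char) (cs : List Char) : List Char :=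
  match cs with
  | [] => []
  | c :: rest0 =>
    let sp := (c :: rest0).takeWhile (fun x => x == ' ')
    let r := (c :: rest0).dropWhile (fun x => x == ' ')
    match _h : r.dropWhile (fun x => x != '\n') with
    | [] =>
        -- find returned -1: append indent * ((j-i)//2) and markdown[j:], stop
        PySem.List.pyRepeat ind ((sp.length / 2 : Nat) : Int) ++ r.takeWhile (fun x => x != '\n')
    | _ :: tl =>
        -- append indent * ((j-i)//2) and markdown[j:k+1] (the line body with its '\n'), continue at k+1
        PySem.List.pyRepeat ind ((sp.length / 2 : Nat) : Int) ++ r.takeWhile (fun x => x != '\n')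
          ++ '\n' :: altGo ind tl
termination_by cs.length
decreasing_by
  have h1 : (List.dropWhile (fun x => x != '\n') r).length ≤ r.length := List.length_dropWhile_le _ _
  have h2 : r.length ≤ (c :: rest0).length := List.length_dropWhile_le _ _
  rw [_h] at h1
  simp at h1 h2 ⊢
  omega

def change_indent_py_alt (markdown : String) (indent : String) : String :=
  if indent.toList = [' ', ' '] then markdown
  else String.ofList (altGo indent.toList markdown.toList)

-- ===== PRECONDITION & SPEC =====
def Spec_change_indent_py (markdown : String) (indent : String) (out : String) : Prop := out = change_indent_py_alt markdown indent
instance (markdown : String) (indent : String) (out : String) : Decidable (Spec_change_indent_py markdown indent out) := by unfold Spec_change_indent_py; infer_instance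

-- ===== CLAIM (what is proved, stated in full; the proofs are below) =====
def Claim_equal_change_indent_py : Prop := ∀ (markdown : String) (indent : String), Dom_change_indent_py markdown indent → Spec_change_indent_py markdown indent (change_indent_py markdown indent)

-- ===== LEMMAS AND PROOFS =====

-- A's per-line rewrite, in takeWhile/dropWhile form
def procLine (ind : List Char) (line : List Char) : List Char :=
  PySem.List.pyRepeat ind (((line.takeWhile (fun c => c == ' ')).length / 2 : Nat) : Int)
    ++ line.dropWhile (fun c => c == ' ')

-- altGo unfolding equations
lemma altGo_nil (ind : List Char) : altGo ind [] = [] := by rw [altGo]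

lemma altGo_cons_nil (ind : List Char) (c : Char) (rest0 : List Char)
    (h : ((c :: rest0).dropWhile (fun x => x == ' ')).dropWhile (fun x => x != '\n') = []) :
    altGo ind (c :: rest0)
      = PySem.List.pyRepeat ind ((((c :: rest0).takeWhile (fun x => x == ' ')).length / 2 : Nat) : Int)
          ++ ((c :: rest0).dropWhile (fun x => x == ' ')).takeWhile (fun x => x != '\n') := by
  rw [altGo]; split
  · rfl
  · rename_i d tl h2; rw [h] at h2; cases h2

lemma altGo_cons_cons (ind : List Char) (c d : Char) (rest0 tl : List Char)
    (h : ((c :: rest0).dropWhile (fun x => x == ' ')).dropWhile (fun x => x != '\n') = d :: tl) :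
    altGo ind (c :: rest0)
      = PySem.List.pyRepeat ind ((((c :: rest0).takeWhile (fun x => x == ' ')).length / 2 : Nat) : Int)
          ++ ((c :: rest0).dropWhile (fun x => x == ' ')).takeWhile (fun x => x != '\n')
          ++ '\n' :: altGo ind tl := by
  rw [altGo]; split
  · rename_i h2; rw [h] at h2; cases h2
  · rename_i d' tl' h2; rw [h] at h2; cases h2; rfl

lemma drop_length_takeWhile (p : Char → Bool) (l : List Char) :
    l.drop (l.takeWhile p).length = l.dropWhile p := by
  induction l with
  | nil => rfl
  | cons a t ih => by_cases h : p a <;> simp [h, ih]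

lemma length_takeWhile_add_dropWhile (p : Char → Bool) (l : List Char) :
    (l.takeWhile p).length + (l.dropWhile p).length = l.length := by
  conv_rhs => rw [← List.takeWhile_append_dropWhile (p := p) (l := l)]
  rw [List.length_append]

-- A's body for one line equals procLine
lemma procLine_eq (ind line : List Char) :
    PySem.List.pyRepeat ind (((line.length - (line.dropWhile (fun c => c == ' ')).length) / 2 : Nat) : Int)
      ++ line.drop (line.length - (line.dropWhile (fun c => c == ' ')).length)
    = procLine ind line := by
  have hlen : line.length - (line.dropWhile (fun c => c == ' ')).length
      = (line.takeWhile (fun c => c == ' ')).length := by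
    have := length_takeWhile_add_dropWhile (fun c => c == ' ') line
    omega
  rw [hlen, drop_length_takeWhile]
  rfl

-- PySem's fuelled splitOn.go in terms of Mathlib's splitOnP (single-character separator '\n')
lemma splitOn_go_eq (fuel : Nat) :
    ∀ (l cur : List Char) (accs : List (List Char)), l.length ≤ fuel →
    PySem.Chars.splitOn.go ['\n'] fuel l cur accs
      = accs.reverse ++ (l.splitOnP (fun c => c == '\n')).modifyHead (cur.reverse ++ ·) := by
  induction fuel with
  | zero =>
    intro l cur accs hl
    have : l = [] := List.eq_nil_of_length_eq_zero (Nat.le_zero.mp hl)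
    subst this
    simp [PySem.Chars.splitOn.go, List.splitOnP_nil]
  | succ n ih =>
    intro l cur accs hl
    match l with
    | [] => simp [PySem.Chars.splitOn.go, List.splitOnP_nil]
    | c :: rest =>
      by_cases hc : c = '\n'
      · subst hc
        have hpre : List.isPrefixOf ['\n'] ('\n' :: rest) = true := by
          simp [List.isPrefixOf]
        rw [PySem.Chars.splitOn.go]
        simp only [hpre, if_true]
        rw [show List.drop ['\n'].length ('\n' :: rest) = rest from rfl]
        rw [ih rest [] (cur.reverse :: accs) (by simpa using Nat.le_of_succ_le_succ hl)]
        rw [List.splitOnP_cons]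
        simp only [beq_self_eq_true, if_true]
        cases hs : rest.splitOnP (fun c => c == '\n') with
        | nil => exact absurd hs (List.splitOnP_ne_nil _ rest)
        | cons a t => simp
      · have hpre : List.isPrefixOf ['\n'] (c :: rest) = false := by
          simp [List.isPrefixOf]
          exact fun h => absurd h.symm hc
        rw [PySem.Chars.splitOn.go]
        simp only [hpre, Bool.false_eq_true, if_false]
        rw [ih rest (c :: cur) accs (by simpa using Nat.le_of_succ_le_succ hl)]
        rw [List.splitOnP_cons]
        simp only [show ((c == '\n') : Bool) = false by simp [hc], Bool.false_eq_true, if_false]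
        cases hs : rest.splitOnP (fun c => c == '\n') with
        | nil => exact absurd hs (List.splitOnP_ne_nil _ rest)
        | cons a t => simp

lemma splitOn_newline (cs : List Char) :
    PySem.Chars.splitOn cs ['\n'] = cs.splitOnP (fun c => c == '\n') := by
  unfold PySem.Chars.splitOn
  rw [splitOn_go_eq (cs.length + 1) cs [] [] (by omega)]
  cases hs : cs.splitOnP (fun c => c == '\n') with
  | nil => exact absurd hs (List.splitOnP_ne_nil _ cs)
  | cons a t => simp

-- splitting a newline-free prefix off
lemma splitOnP_no_newline_append (l ys : List Char) (h : ∀ c ∈ l, (c == '\n') = false) :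
    (l ++ ys).splitOnP (fun c => c == '\n')
      = (ys.splitOnP (fun c => c == '\n')).modifyHead (l ++ ·) := by
  induction l with
  | nil =>
    cases hs : ys.splitOnP (fun c => c == '\n') with
    | nil => exact absurd hs (List.splitOnP_ne_nil _ ys)
    | cons a t => simp [hs]
  | cons a t ih =>
    have ha : ((a == '\n') : Bool) = false := h a (by simp)
    rw [List.cons_append, List.splitOnP_cons, ha]
    simp only [Bool.false_eq_true, if_false]
    rw [ih (fun c hc => h c (by simp [hc]))]
    cases hs : ys.splitOnP (fun c => c == '\n') with
    | nil => exact absurd hs (List.splitOnP_ne_nil _ ys)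
    | cons b u => simp

-- the non-newline drop of cs factors through its space prefix
lemma span_comm (cs : List Char) :
    cs.takeWhile (fun x => x != '\n')
      = cs.takeWhile (fun x => x == ' ')
        ++ (cs.dropWhile (fun x => x == ' ')).takeWhile (fun x => x != '\n')
    ∧ cs.dropWhile (fun x => x != '\n')
      = (cs.dropWhile (fun x => x == ' ')).dropWhile (fun x => x != '\n') := by
  induction cs with
  | nil => simp
  | cons a t ih =>
    by_cases h : a = ' '
    · subst h
      constructor
      · simpa using ih.1
      · simpa using ih.2
    · constructor <;>
        simp [List.takeWhile_cons, List.dropWhile_cons, show ((a == ' ') : Bool) = false by simp [h]]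

-- the space prefix and space-stripped remainder of the current line
lemma takeWhile_space_line (cs : List Char) :
    (cs.takeWhile (fun x => x != '\n')).takeWhile (fun c => c == ' ')
      = cs.takeWhile (fun x => x == ' ')
    ∧ (cs.takeWhile (fun x => x != '\n')).dropWhile (fun c => c == ' ')
      = (cs.dropWhile (fun x => x == ' ')).takeWhile (fun x => x != '\n') := by
  induction cs with
  | nil => simp
  | cons a t ih =>
    by_cases h : a = ' '
    · subst h
      constructor
      · simpa using ih.1
      · simpa using ih.2
    · by_cases hn : a = '\n'
      · subst hn; simp
      · constructor <;>
          simp [show ((a == ' ') : Bool) = false by simp [h],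
                show ((a != '\n') : Bool) = true by simp [hn]]

lemma dropWhile_ne_newline_head : ∀ (l : List Char) (d : Char) (tl : List Char),
    l.dropWhile (fun x => x != '\n') = d :: tl → d = '\n' := by
  intro l
  induction l with
  | nil => intro d tl h; cases h
  | cons a t ih =>
    intro d tl h
    rw [List.dropWhile_cons] at h
    by_cases ha : a = '\n'
    · subst ha; simp at h; exact h.1.symm
    · simp [show ((a != '\n') : Bool) = true by simp [ha]] at h
      exact ih d tl h

-- main loop equality: A's join-of-mapped-lines equals B's single pass
lemma join_split_eq_altGo (ind : List Char) : ∀ (cs : List Char),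
    PySem.Chars.join ['\n'] ((cs.splitOnP (fun c => c == '\n')).map (procLine ind))
      = altGo ind cs := by
  intro cs
  induction hn : cs.length using Nat.strong_induction_on generalizing cs with
  | _ n ih =>
  match cs with
  | [] =>
    rw [altGo_nil]
    simp [List.splitOnP_nil, PySem.Chars.join, List.intercalate, procLine, PySem.List.pyRepeat]
  | c :: rest0 =>
    have hdecomp : c :: rest0
        = (c :: rest0).takeWhile (fun x => x != '\n') ++ (c :: rest0).dropWhile (fun x => x != '\n') :=
      (List.takeWhile_append_dropWhile).symm
    have hline : ∀ x ∈ (c :: rest0).takeWhile (fun x => x != '\n'), ((x == '\n') : Bool) = false := by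
      intro x hx
      have := List.mem_takeWhile_imp hx
      simpa using this
    cases hr2 : (c :: rest0).dropWhile (fun x => x != '\n') with
    | nil =>
      have hsplit : (c :: rest0).splitOnP (fun c => c == '\n')
          = [(c :: rest0).takeWhile (fun x => x != '\n')] := by
        conv_lhs => rw [hdecomp, hr2]
        rw [splitOnP_no_newline_append _ [] hline]
        simp [List.splitOnP_nil]
      rw [hsplit]
      rw [altGo_cons_nil ind c rest0 (by rw [← (span_comm (c :: rest0)).2, hr2])]
      simp only [List.map_cons, List.map_nil]
      rw [show PySem.Chars.join ['\n'] [procLine ind ((c :: rest0).takeWhile (fun x => x != '\n'))]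
            = procLine ind ((c :: rest0).takeWhile (fun x => x != '\n')) by
        simp [PySem.Chars.join, List.intercalate]]
      rw [procLine, (takeWhile_space_line (c :: rest0)).1, (takeWhile_space_line (c :: rest0)).2]
    | cons d tl =>
      have hd : d = '\n' := dropWhile_ne_newline_head _ _ _ hr2
      subst hd
      have hsplit : (c :: rest0).splitOnP (fun c => c == '\n')
          = (c :: rest0).takeWhile (fun x => x != '\n') :: tl.splitOnP (fun c => c == '\n') := by
        conv_lhs => rw [hdecomp, hr2]
        rw [splitOnP_no_newline_append _ _ hline, List.splitOnP_cons]
        simp only [beq_self_eq_true, if_true]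
        cases hs : tl.splitOnP (fun c => c == '\n') with
        | nil => exact absurd hs (List.splitOnP_ne_nil _ tl)
        | cons a t => simp
      rw [hsplit]
      have hlen : tl.length < n := by
        have h1 : ((c :: rest0).dropWhile (fun x => x != '\n')).length ≤ (c :: rest0).length :=
          List.length_dropWhile_le _ _
        rw [hr2] at h1
        simp at h1
        simp at hn
        omega
      have hrec := ih tl.length hlen tl rfl
      rw [altGo_cons_cons ind c '\n' rest0 tl (by rw [← (span_comm (c :: rest0)).2, hr2])]
      rw [List.map_cons]
      cases hs : (tl.splitOnP (fun c => c == '\n')).map (procLine ind) with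
      | nil =>
        exact absurd (List.map_eq_nil_iff.mp hs) (List.splitOnP_ne_nil _ tl)
      | cons b u =>
        rw [show PySem.Chars.join ['\n']
              (procLine ind ((c :: rest0).takeWhile (fun x => x != '\n')) :: b :: u)
              = procLine ind ((c :: rest0).takeWhile (fun x => x != '\n'))
                  ++ '\n' :: PySem.Chars.join ['\n'] (b :: u) by
          simp [PySem.Chars.join, List.intercalate]]
        rw [← hs, hrec]
        rw [procLine, (takeWhile_space_line (c :: rest0)).1, (takeWhile_space_line (c :: rest0)).2]

-- ===== VERDICT (by name: the statement is the Claim_ definition above) =====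
theorem change_indent_py_spec : Claim_equal_change_indent_py := by
  intro markdown indent _
  unfold Spec_change_indent_py change_indent_py change_indent_py_alt
  by_cases h : indent.toList = [' ', ' ']
  · simp [h]
  · simp only [h, if_false]
    congr 1
    rw [splitOn_newline]
    rw [PySem.List.foldl_append_singleton_eq_map]
    simp only [List.nil_append]
    rw [show ((markdown.toList.splitOnP (fun c => c == '\n')).map fun line =>
          PySem.List.pyRepeat indent.toList (((line.length - (line.dropWhile (fun c => c == ' ')).length) / 2 : Nat) : Int)
            ++ line.drop (line.length - (line.dropWhile (fun c => c == ' ')).length))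
        = (markdown.toList.splitOnP (fun c => c == '\n')).map (procLine indent.toList) from
      List.map_congr_left (fun line _ => procLine_eq indent.toList line)]
    exact join_split_eq_altGo indent.toList markdown.toList
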